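-- pv_equiv track=rewrite | github.com/nahumj/CSE-431 | _weeks/week10/BinPacking/bin_packing.py | bin_packing_brute_force
-- ===== SOURCE A (Python) =====
-- import copy
--
-- def bin_packing_brute_force(threshold, values, included=None, excluded=None, undecided=None):
--     if included is None:
--         included = []
--         excluded = []
--         undecided = list(values)
--     if not undecided:
--         total = sum(included)
--         if total > threshold:
--             return 0
--         return total
--
--     included = copy.copy(included)
--     excluded = copy.copy(excluded)
--     undecided = copy.copy(undecided)
--
--     next_value = undecided.pop()
--
--     included.append(next_value)
--     total_with_value = bin_packing_brute_force(
--         threshold, values, included, excluded, undecided)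
--
--     del included[-1]
--     excluded.append(next_value)
--     total_without_value = bin_packing_brute_force(
--         threshold, values, included, excluded, undecided)
--
--     best_total = max(total_with_value, total_without_value)
--     return best_total
-- ===== SOURCE B (Python) =====
-- def bin_packing_brute_force(threshold, values, included=None, excluded=None, undecided=None):
--     if included is None:
--         base, items = 0, list(values)
--     else:
--         base, items = sum(included), (list(undecided) if undecided else [])
--     sums = {base}
--     for v in items:
--         sums |= {s + v for s in sums}
--     return max((s if s <= threshold else 0) for s in sums)
-- ===== Notes on version B (the rewrite author's own statement) =====
-- stated objective: alternative
-- what changed: Replaced the exponential include/exclude recursion by an iterative reachable-sums set DP: fold each value into a set of achievable totals, then take the max of the capped totals; duplicate partial sums are merged so repeated values no longer double the work.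
import Mathlib
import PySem

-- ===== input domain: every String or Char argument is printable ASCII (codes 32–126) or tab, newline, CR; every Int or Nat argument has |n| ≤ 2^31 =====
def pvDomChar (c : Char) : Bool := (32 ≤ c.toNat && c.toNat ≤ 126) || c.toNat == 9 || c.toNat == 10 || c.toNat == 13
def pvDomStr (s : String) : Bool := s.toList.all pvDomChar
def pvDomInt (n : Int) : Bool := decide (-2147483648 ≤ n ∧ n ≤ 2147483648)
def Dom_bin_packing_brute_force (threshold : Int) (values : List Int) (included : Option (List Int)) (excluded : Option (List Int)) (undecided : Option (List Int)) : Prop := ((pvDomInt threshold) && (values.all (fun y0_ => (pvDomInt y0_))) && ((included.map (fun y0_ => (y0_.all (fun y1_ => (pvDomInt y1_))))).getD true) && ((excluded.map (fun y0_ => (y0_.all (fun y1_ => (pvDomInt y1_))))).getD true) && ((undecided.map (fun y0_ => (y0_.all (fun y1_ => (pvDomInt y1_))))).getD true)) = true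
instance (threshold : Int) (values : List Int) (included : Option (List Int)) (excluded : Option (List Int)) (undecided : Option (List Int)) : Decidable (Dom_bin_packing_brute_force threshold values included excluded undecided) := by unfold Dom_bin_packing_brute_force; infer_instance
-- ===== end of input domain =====

-- B replaces A's exponential include/exclude recursion by an iterative set of reachable sums
-- (objective: alternative algorithm; equivalence is about the return value only — neither program mutates its caller's lists).

-- ===== PORT A =====
-- A's recursion once the three lists are concrete: pop from the END of undecided,
-- branch on including/excluding it, take the max.
def bbf_go (threshold : Int) (included : List Int) (excluded : List Int) (undecided : List Int) : Int :=
  if hu : undecided = [] then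
    let total := included.sum
    if total > threshold then 0 else total
  else
    let next_value := undecided.getLast hu
    let undecided' := undecided.dropLast
    let total_with_value := bbf_go threshold (included ++ [next_value]) excluded undecided'
    let total_without_value := bbf_go threshold included (excluded ++ [next_value]) undecided'
    max total_with_value total_without_value
termination_by undecided.length
decreasing_by
  all_goals
    simp only [List.length_dropLast]
    exact Nat.sub_lt (List.length_pos_of_ne_nil hu) Nat.one_pos

def bin_packing_brute_force (threshold : Int) (values : List Int) (included : Option (List Int)) (excluded : Option (List Int)) (undecided : Option (List Int)) : Int :=
  match included with
  | none => bbf_go threshold [] [] values          -- included=None: fresh lists, undecided = list(values)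
  | some inc =>
    match undecided with
    | none => if inc.sum > threshold then 0 else inc.sum        -- `if not undecided` base case
    | some [] => if inc.sum > threshold then 0 else inc.sum
    | some (v :: l) =>
      match excluded with
      | some exc => bbf_go threshold inc exc (v :: l)
      | none => 0   -- Python raises AttributeError here (excluded is None, excluded.append fails); outside Pre_

-- ===== PORT B =====
-- Source B's loop: sums = {base}; for v in items: sums |= {s + v for s in sums}
def bbf_sums (base : Int) (items : List Int) : PySem.Set Int :=
  items.foldl (fun ss v => PySem.Set.union ss (List.map (fun s => s + v) ss)) (PySem.Set.ofList [base])

def bin_packing_brute_force_alt (threshold : Int) (values : List Int) (included : Option (List Int)) (excluded : Option (List Int)) (undecided : Option (List Int)) : Int :=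
  let bi : Int × List Int :=
    match included with
    | none => (0, values)
    | some inc => (inc.sum, undecided.getD [])   -- list(undecided) if undecided else []
  -- max((s if s <= threshold else 0) for s in sums); the set is nonempty so Python's max returns
  match PySem.List.max? ((bbf_sums bi.1 bi.2).map (fun s => if s ≤ threshold then s else 0)) (fun x => x) with
  | some m => m
  | none => 0

-- ===== PRECONDITION & SPEC =====
-- Pre_ excludes exactly the inputs where A raises AttributeError: included given,
-- excluded None, undecided a nonempty list (then A reaches excluded.append on None).
def Pre_bin_packing_brute_force (threshold : Int) (values : List Int) (included : Option (List Int)) (excluded : Option (List Int)) (undecided : Option (List Int)) : Prop :=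
  included.isNone = true ∨ excluded.isSome = true ∨ undecided.getD [] = []
instance (threshold : Int) (values : List Int) (included : Option (List Int)) (excluded : Option (List Int)) (undecided : Option (List Int)) : Decidable (Pre_bin_packing_brute_force threshold values included excluded undecided) := by unfold Pre_bin_packing_brute_force; infer_instance
def pvWitness_bin_packing_brute_force : Int × List Int × Option (List Int) × Option (List Int) × Option (List Int) := (10, [1, 2, 3], none, none, none)

def Spec_bin_packing_brute_force (threshold : Int) (values : List Int) (included : Option (List Int)) (excluded : Option (List Int)) (undecided : Option (List Int)) (out : Int) : Prop := out = bin_packing_brute_force_alt threshold values included excluded undecided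
instance (threshold : Int) (values : List Int) (included : Option (List Int)) (excluded : Option (List Int)) (undecided : Option (List Int)) (out : Int) : Decidable (Spec_bin_packing_brute_force threshold values included excluded undecided out) := by unfold Spec_bin_packing_brute_force; infer_instance

-- ===== CLAIM (what is proved, stated in full; the proofs are below) =====
def Claim_equal_bin_packing_brute_force : Prop := ∀ (threshold : Int) (values : List Int) (included : Option (List Int)) (excluded : Option (List Int)) (undecided : Option (List Int)), Dom_bin_packing_brute_force threshold values included excluded undecided → Pre_bin_packing_brute_force threshold values included excluded undecided → Spec_bin_packing_brute_force threshold values included excluded undecided (bin_packing_brute_force threshold values included excluded undecided)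
-- ===== LEMMAS AND PROOFS =====

-- the capped total both programs score a sum with
def pvPf (t s : Int) : Int := if s ≤ t then s else 0

-- s is reachable from base by adding a sub-multiset (sublist) of l
def Ach (base : Int) (l : List Int) (s : Int) : Prop := ∃ u : List Int, u.Sublist l ∧ s = base + u.sum

-- m is the maximum capped reachable total
def IsBest (t base : Int) (l : List Int) (m : Int) : Prop :=
  (∃ s, Ach base l s ∧ m = pvPf t s) ∧ ∀ s, Ach base l s → pvPf t s ≤ m

lemma ach_nil (base s : Int) : Ach base [] s ↔ s = base := by
  constructor
  · rintro ⟨u, hu, rfl⟩; simp [List.sublist_nil.mp hu]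
  · rintro rfl; exact ⟨[], by simp⟩

lemma ach_cons (base v : Int) (l : List Int) (s : Int) :
    Ach base (v :: l) s ↔ Ach base l s ∨ Ach (base + v) l s := by
  constructor
  · rintro ⟨u, hu, rfl⟩
    rcases List.sublist_cons_iff.mp hu with h | ⟨r, rfl, hr⟩
    · exact Or.inl ⟨u, h, rfl⟩
    · exact Or.inr ⟨r, hr, by simp; ring⟩
  · rintro (⟨u, hu, rfl⟩ | ⟨u, hu, rfl⟩)
    · exact ⟨u, hu.cons _, rfl⟩
    · exact ⟨v :: u, (List.cons_sublist_cons).mpr hu, by simp; ring⟩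

lemma ach_concat (base a : Int) (l : List Int) (s : Int) :
    Ach base (l ++ [a]) s ↔ Ach (base + a) l s ∨ Ach base l s := by
  induction l generalizing base with
  | nil => simp only [List.nil_append, ach_cons, ach_nil]; tauto
  | cons v l ih =>
    have hc : base + a + v = base + v + a := by ring
    simp only [List.cons_append, ach_cons, ih, hc]
    tauto

lemma mem_foldl_sums (items : List Int) (ss : PySem.Set Int) (y : Int) :
    y ∈ items.foldl (fun ss v => PySem.Set.union ss (List.map (fun s => s + v) ss)) ss ↔
      ∃ s0 ∈ ss, Ach s0 items y := by
  induction items generalizing ss with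
  | nil =>
    simp only [List.foldl_nil, ach_nil]
    constructor
    · exact fun h => ⟨y, h, rfl⟩
    · rintro ⟨s0, h, rfl⟩; exact h
  | cons v rest ih =>
    simp only [List.foldl_cons, ih]
    constructor
    · rintro ⟨s0, hs0, hach⟩
      rcases (PySem.Set.mem_union ss _ s0).mp hs0 with h | h
      · exact ⟨s0, h, (ach_cons _ _ _ _).mpr (Or.inl hach)⟩
      · rcases List.mem_map.mp h with ⟨s1, hs1, rfl⟩
        exact ⟨s1, hs1, (ach_cons _ _ _ _).mpr (Or.inr hach)⟩
    · rintro ⟨s0, hs0, hach⟩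
      rcases (ach_cons _ _ _ _).mp hach with h | h
      · exact ⟨s0, (PySem.Set.mem_union ss _ s0).mpr (Or.inl hs0), h⟩
      · exact ⟨s0 + v, (PySem.Set.mem_union ss _ _).mpr
          (Or.inr (List.mem_map.mpr ⟨s0, hs0, rfl⟩)), h⟩

lemma mem_bbf_sums (base : Int) (items : List Int) (y : Int) :
    y ∈ bbf_sums base items ↔ Ach base items y := by
  unfold bbf_sums
  rw [mem_foldl_sums]
  constructor
  · rintro ⟨s0, hs0, h⟩
    rcases (PySem.Set.mem_ofList [base] s0).mp hs0 with h'
    simp at h'; subst h'; exact h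
  · intro h; exact ⟨base, (PySem.Set.mem_ofList [base] base).mpr (by simp), h⟩

lemma isBest_nil (t base : Int) : IsBest t base [] (pvPf t base) := by
  refine ⟨⟨base, (ach_nil _ _).mpr rfl, rfl⟩, ?_⟩
  intro s hs; rw [(ach_nil _ _).mp hs]

lemma isBest_max (t base a : Int) (l : List Int) (m1 m2 : Int)
    (h1 : IsBest t (base + a) l m1) (h2 : IsBest t base l m2) :
    IsBest t base (l ++ [a]) (max m1 m2) := by
  obtain ⟨⟨s1, ha1, he1⟩, hb1⟩ := h1
  obtain ⟨⟨s2, ha2, he2⟩, hb2⟩ := h2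
  constructor
  · rcases le_total m1 m2 with h | h
    · exact ⟨s2, (ach_concat _ _ _ _).mpr (Or.inr ha2), by omega⟩
    · exact ⟨s1, (ach_concat _ _ _ _).mpr (Or.inl ha1), by omega⟩
  · intro s hs
    rcases (ach_concat _ _ _ _).mp hs with h | h
    · exact le_trans (hb1 s h) (le_max_left _ _)
    · exact le_trans (hb2 s h) (le_max_right _ _)

lemma bbf_go_isBest (t : Int) (und inc exc : List Int) :
    IsBest t inc.sum und (bbf_go t inc exc und) := by
  induction und using List.reverseRecOn generalizing inc exc with
  | nil =>
    rw [bbf_go]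
    have : (if inc.sum > t then 0 else inc.sum) = pvPf t inc.sum := by
      unfold pvPf; split_ifs <;> omega
    rw [this]; exact isBest_nil t inc.sum
  | append_singleton l a ih =>
    rw [bbf_go]
    have hne : l ++ [a] ≠ [] := by simp
    simp only [dif_neg hne, List.getLast_append, List.dropLast_concat]
    have h1 := ih (inc := inc ++ [a]) (exc := exc)
    have h2 := ih (inc := inc) (exc := exc ++ [a])
    rw [List.sum_append] at h1
    simp at h1
    exact isBest_max t inc.sum a l _ _ h1 h2

lemma alt_core_eq (t base : Int) (items : List Int) (m : Int) (h : IsBest t base items m) :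
    (match PySem.List.max? ((bbf_sums base items).map (fun s => if s ≤ t then s else 0)) (fun x => x) with
     | some m' => m'
     | none => 0) = m := by
  obtain ⟨⟨s0, hach, hm⟩, hbd⟩ := h
  have hmem : m ∈ (bbf_sums base items).map (fun s => if s ≤ t then s else 0) := by
    refine List.mem_map.mpr ⟨s0, (mem_bbf_sums _ _ _).mpr hach, ?_⟩
    rw [hm]; rfl
  have hne : (bbf_sums base items).map (fun s => if s ≤ t then s else 0) ≠ [] :=
    fun h0 => by simp [h0] at hmem
  rcases hmax : PySem.List.max? ((bbf_sums base items).map (fun s => if s ≤ t then s else 0)) (fun x => x) with _ | m'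
  · exact absurd ((PySem.List.max?_eq_none_iff _ _).mp hmax) hne
  · have hmem' := PySem.List.max?_mem hmax
    rcases List.mem_map.mp hmem' with ⟨s', hs', rfl⟩
    have hle1 : (if s' ≤ t then s' else 0) ≤ m := hbd s' ((mem_bbf_sums _ _ _).mp hs')
    have hle2 : m ≤ (if s' ≤ t then s' else 0) := PySem.List.max?_isMax hmax m hmem
    show (if s' ≤ t then s' else 0) = m
    omega

-- ===== VERDICT (by name: the statement is the Claim_ definition above) =====
theorem bin_packing_brute_force_spec : Claim_equal_bin_packing_brute_force := by
  intro t values included excluded undecided _hdom hpre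
  unfold Spec_bin_packing_brute_force bin_packing_brute_force bin_packing_brute_force_alt
  match included with
  | none =>
    simp only
    exact (alt_core_eq t 0 values _ (by simpa using bbf_go_isBest t values [] [])).symm
  | some inc =>
    match undecided with
    | none =>
      simp only [Option.getD_none]
      have h := alt_core_eq t inc.sum [] _ (isBest_nil t inc.sum)
      rw [h]; unfold pvPf; split_ifs <;> omega
    | some [] =>
      simp only [Option.getD_some]
      have h := alt_core_eq t inc.sum [] _ (isBest_nil t inc.sum)
      rw [h]; unfold pvPf; split_ifs <;> omega
    | some (v :: l) =>
      match excluded with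
      | some exc =>
        simp only [Option.getD_some]
        exact (alt_core_eq t inc.sum (v :: l) _ (bbf_go_isBest t (v :: l) inc exc)).symm
      | none =>
        exfalso
        rcases hpre with h | h | h <;> simp at h
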